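-- pv_equiv track=rewrite | github.com/junwang1234/code-agent-from-scratch | src/runtime/observation_analysis.py | representative_nested_files
-- ===== SOURCE A (Python) =====
-- def representative_nested_files(nested_files: list[str]) -> list[str]:
--     preferred = []
--     for needle in ("scripts/", "tests/", "references/"):
--         preferred.extend([path for path in nested_files if path.startswith(needle)])
--     ordered = []
--     for path in preferred + nested_files:
--         if path not in ordered:
--             ordered.append(path)
--     return ordered[:4]
-- ===== SOURCE B (Python) =====
-- def representative_nested_files(nested_files: list[str]) -> list[str]:
--     seen = set()
--     unique = []
--     for path in nested_files:
--         if path not in seen: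
--             seen.add(path)
--             unique.append(path)
--
--     def priority(path: str) -> int:
--         if path.startswith("scripts/"):
--             return 0
--         if path.startswith("tests/"):
--             return 1
--         if path.startswith("references/"):
--             return 2
--         return 3
--
--     return sorted(unique, key=priority)[:4]
-- ===== Notes on version B (the rewrite author's own statement) =====
-- stated objective: faster
-- what changed: Replaces A's three repeated prefix scans plus quadratic list-membership dedup with a set-based one-pass dedup followed by one stable sort by a priority key (index of first matching prefix, 3 if none).
import Mathlib
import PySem

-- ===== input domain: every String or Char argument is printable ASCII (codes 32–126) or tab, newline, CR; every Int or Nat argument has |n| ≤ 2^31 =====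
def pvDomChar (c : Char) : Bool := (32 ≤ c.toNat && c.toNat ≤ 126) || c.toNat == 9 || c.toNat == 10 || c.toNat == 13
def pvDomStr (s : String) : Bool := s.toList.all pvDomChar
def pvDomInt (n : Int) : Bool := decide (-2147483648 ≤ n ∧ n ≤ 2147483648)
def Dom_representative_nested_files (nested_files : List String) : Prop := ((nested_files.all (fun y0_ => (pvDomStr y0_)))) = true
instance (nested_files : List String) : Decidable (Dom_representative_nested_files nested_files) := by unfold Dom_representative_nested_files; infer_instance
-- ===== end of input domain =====

-- B replaces A's three prefix scans + quadratic list-membership dedup by a set-based one-pass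
-- dedup followed by one stable sort by a priority key (objective: faster).

-- ===== PORT A =====
def representative_nested_files (nested_files : List String) : List String :=
  let preferred := List.foldl
    (fun pref needle => pref ++ nested_files.filter (fun path => PySem.Str.startswith path needle))
    [] ["scripts/", "tests/", "references/"]
  let ordered := List.foldl
    (fun ordered path => if ordered.contains path then ordered else ordered ++ [path])
    [] (preferred ++ nested_files)
  PySem.List.slice ordered none (some 4)

-- ===== PORT B =====
-- Source B's inner `priority` helper
def pvPriority (path : String) : Int :=
  if PySem.Str.startswith path "scripts/" then 0
  else if PySem.Str.startswith path "tests/" then 1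
  else if PySem.Str.startswith path "references/" then 2
  else 3

def representative_nested_files_alt (nested_files : List String) : List String :=
  let st := List.foldl
    (fun (acc : PySem.Set String × List String) path =>
      if PySem.Set.contains acc.1 path then acc
      else (PySem.Set.add acc.1 path, acc.2 ++ [path]))
    (PySem.Set.empty, []) nested_files
  PySem.List.slice (PySem.List.sorted st.2 pvPriority false) none (some 4)

-- ===== PRECONDITION & SPEC =====
def Spec_representative_nested_files (nested_files : List String) (out : List String) : Prop := out = representative_nested_files_alt nested_files
instance (nested_files : List String) (out : List String) : Decidable (Spec_representative_nested_files nested_files out) := by unfold Spec_representative_nested_files; infer_instance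

-- ===== CLAIM (what is proved, stated in full; the proofs are below) =====
def Claim_equal_representative_nested_files : Prop := ∀ (nested_files : List String), Dom_representative_nested_files nested_files → Spec_representative_nested_files nested_files (representative_nested_files nested_files)

-- ===== LEMMAS AND PROOFS =====

-- abbreviation for the priority-i bucket predicate
def pvK (i : Int) (p : String) : Bool := pvPriority p == i

lemma pvPriority_cases (p : String) :
    pvPriority p = 0 ∨ pvPriority p = 1 ∨ pvPriority p = 2 ∨ pvPriority p = 3 := by
  unfold pvPriority; split_ifs <;> simp

-- two incomparable prefixes cannot both be prefixes of the same string
lemma startswith_excl (s : String) {p q : String}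
    (hpq : ¬ (p.toList <+: q.toList)) (hqp : ¬ (q.toList <+: p.toList))
    (h : PySem.Str.startswith s p = true) : PySem.Str.startswith s q = false := by
  unfold PySem.Str.startswith PySem.Chars.startswith at *
  rw [List.isPrefixOf_iff_prefix] at h
  by_contra hq
  rw [Bool.not_eq_false, List.isPrefixOf_iff_prefix] at hq
  rcases List.prefix_or_prefix_of_prefix h hq with h' | h'
  · exact hpq h'
  · exact hqp h'

lemma start_scripts_eq (p : String) :
    PySem.Str.startswith p "scripts/" = pvK 0 p := by
  unfold pvK pvPriority
  cases h : PySem.Str.startswith p "scripts/"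
  · split_ifs <;> simp_all
  · simp

lemma start_tests_eq (p : String) :
    PySem.Str.startswith p "tests/" = pvK 1 p := by
  unfold pvK pvPriority
  cases h : PySem.Str.startswith p "tests/"
  · split_ifs <;> simp_all
  · have hs : PySem.Str.startswith p "scripts/" = false :=
      startswith_excl p (by decide) (by decide) h
    rw [hs]; simp

lemma start_refs_eq (p : String) :
    PySem.Str.startswith p "references/" = pvK 2 p := by
  unfold pvK pvPriority
  cases h : PySem.Str.startswith p "references/"
  · split_ifs <;> simp_all
  · have hs : PySem.Str.startswith p "scripts/" = false :=
      startswith_excl p (by decide) (by decide) h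
    have ht : PySem.Str.startswith p "tests/" = false :=
      startswith_excl p (by decide) (by decide) h
    rw [hs, ht]; simp

lemma mem_filter_pvK {i : Int} {u : List String} {a : String}
    (h : a ∈ u.filter (pvK i)) : pvPriority a = i := by
  have := (List.mem_filter.mp h).2
  unfold pvK at this
  exact eq_of_beq this

-- the dedup loop: folding Set.add over bs starting at s
lemma foldl_add_eq (bs : List String) : ∀ s : List String,
    List.foldl PySem.Set.add s bs
      = s ++ (PySem.List.dedup bs).filter (fun x => ! s.contains x) := by
  induction bs with
  | nil => intro s; simp [PySem.List.dedup, PySem.Set.ofList]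
  | cons b bs ih =>
    intro s
    have hded : PySem.List.dedup (b :: bs)
        = b :: (PySem.List.dedup bs).filter (fun x => ! [b].contains x) := by
      show PySem.Set.ofList (b :: bs) = _
      unfold PySem.Set.ofList
      rw [List.foldl_cons]
      have h1 : PySem.Set.add PySem.Set.empty b = [b] := rfl
      rw [h1]
      exact ih [b]
    rw [List.foldl_cons, ih (PySem.Set.add s b), hded, List.filter_cons]
    by_cases hb : b ∈ s
    · have hadd : PySem.Set.add s b = s := by
        simp [PySem.Set.add, PySem.Set.contains, hb]
      rw [hadd, if_neg (by simp [hb] : ¬((!s.contains b) = true))]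
      simp only [List.filter_filter]
      congr 1
      apply List.filter_congr
      intro x _
      by_cases hx : x ∈ s
      · simp [hx]
      · have hbx : (b == x) = false := by
          refine beq_eq_false_iff_ne.mpr ?_
          intro hEq; exact hx (hEq ▸ hb)
        simp [hx, hbx]
        exact fun hEq => hx (hEq ▸ hb)
    · have hadd : PySem.Set.add s b = s ++ [b] := by
        simp [PySem.Set.add, PySem.Set.contains, hb]
      rw [hadd, if_pos (by simp [hb] : (!s.contains b) = true)]
      simp only [List.filter_filter, List.append_assoc, List.singleton_append]
      congr 2
      apply List.filter_congr
      intro x _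
      by_cases hx : x ∈ s
      · simp [hx]
      · by_cases hbx : b = x
        · simp [hbx]
        · have h1 : (b == x) = false := beq_eq_false_iff_ne.mpr hbx
          have h2 : x ∉ s ++ [b] := by
            simp [hx]
            intro hEq; exact hbx hEq.symm
          simp [hx, h1, h2]
          exact fun hEq => hbx hEq.symm

lemma ofList_append_singleton (as : List String) (x : String) :
    PySem.Set.ofList (as ++ [x]) = PySem.Set.add (PySem.Set.ofList as) x := by
  unfold PySem.Set.ofList
  rw [List.foldl_append]
  rfl

lemma add_filter_pos {q : String → Bool} {x : String} (hq : q x = true) (s : List String) :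
    List.filter q (PySem.Set.add s x) = PySem.Set.add (List.filter q s) x := by
  by_cases hm : x ∈ s
  · have h2 : x ∈ List.filter q s := List.mem_filter.mpr ⟨hm, hq⟩
    simp [PySem.Set.add, PySem.Set.contains, hm, h2]
  · have h2 : x ∉ List.filter q s := fun hx => hm (List.mem_filter.mp hx).1
    simp [PySem.Set.add, PySem.Set.contains, hm, h2, List.filter_append, hq]

lemma add_filter_neg {q : String → Bool} {x : String} (hq : q x = false) (s : List String) :
    List.filter q (PySem.Set.add s x) = List.filter q s := by
  by_cases hm : x ∈ s
  · simp [PySem.Set.add, PySem.Set.contains, hm]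
  · simp [PySem.Set.add, PySem.Set.contains, hm, List.filter_append, hq]

lemma dedup_filter (q : String → Bool) (xs : List String) :
    PySem.List.dedup (xs.filter q) = (PySem.List.dedup xs).filter q := by
  induction xs using List.reverseRecOn with
  | nil => rfl
  | append_singleton l x ih =>
    rw [List.filter_append]
    cases hq : q x
    · have hfx : List.filter q [x] = ([] : List String) := by simp [hq]
      rw [hfx, List.append_nil]
      rw [ih, show PySem.List.dedup (l ++ [x]) = PySem.Set.add (PySem.List.dedup l) x from
        ofList_append_singleton l x, add_filter_neg hq]
    · have hfx : List.filter q [x] = [x] := by simp [hq]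
      rw [hfx]
      rw [show PySem.List.dedup (l.filter q ++ [x])
            = PySem.Set.add (PySem.List.dedup (l.filter q)) x from
          ofList_append_singleton (l.filter q) x,
        ih,
        show PySem.List.dedup (l ++ [x]) = PySem.Set.add (PySem.List.dedup l) x from
          ofList_append_singleton l x,
        add_filter_pos hq]

-- B's loop state: seen and unique stay the same list
lemma b_loop_eq (xs : List String) : ∀ s : List String,
    List.foldl
      (fun (acc : PySem.Set String × List String) path =>
        if PySem.Set.contains acc.1 path then acc
        else (PySem.Set.add acc.1 path, acc.2 ++ [path]))
      (s, s) xs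
    = (List.foldl PySem.Set.add s xs, List.foldl PySem.Set.add s xs) := by
  induction xs with
  | nil => intro s; simp
  | cons x xs ih =>
    intro s
    simp only [List.foldl_cons]
    by_cases hx : x ∈ s
    · have h1 : PySem.Set.contains s x = true := by simp [PySem.Set.contains, hx]
      have hadd : PySem.Set.add s x = s := by
        unfold PySem.Set.add
        rw [if_pos h1]
      rw [if_pos h1, hadd, ih]
    · have h1 : ¬ (PySem.Set.contains s x = true) := by simp [PySem.Set.contains, hx]
      have hadd : PySem.Set.add s x = s ++ [x] := by
        unfold PySem.Set.add
        rw [if_neg h1]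
      rw [if_neg h1, hadd, ← ih (s ++ [x]), ← hadd]

-- insertBy helpers
lemma insertBy_cons (bf : String → String → Bool) (x y : String) (ys : List String) :
    PySem.List.insertBy bf x (y :: ys)
      = if bf x y then x :: y :: ys else y :: PySem.List.insertBy bf x ys := rfl

lemma insertBy_skip (bf : String → String → Bool) (x : String) (as bs : List String)
    (h : ∀ a ∈ as, bf x a = false) :
    PySem.List.insertBy bf x (as ++ bs) = as ++ PySem.List.insertBy bf x bs := by
  induction as with
  | nil => simp
  | cons a as ih =>
    have ha : bf x a = false := h a (by simp)
    rw [List.cons_append, insertBy_cons, ha]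
    simp only [Bool.false_eq_true, if_false]
    rw [ih (fun a' ha' => h a' (by simp [ha']))]
    rfl

lemma insertBy_front (bf : String → String → Bool) (x : String) (l : List String)
    (h : ∀ a ∈ l, bf x a = true) :
    PySem.List.insertBy bf x l = x :: l := by
  cases l with
  | nil => rfl
  | cons a t =>
    have ha : bf x a = true := h a (by simp)
    rw [insertBy_cons, ha]
    simp

-- value of the bucket predicates at a fixed priority
lemma pvK_val {x : String} {i j : Int} (h : pvPriority x = i) : pvK j x = decide (i = j) := by
  unfold pvK
  rw [h]
  cases hd : decide (i = j)
  · simp at hd; simp [hd]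
  · simp at hd; simp [hd]

-- stable sort by a {0,1,2,3}-valued key is bucket concatenation
lemma sorted_prio (u : List String) :
    PySem.List.sorted u pvPriority false
      = u.filter (pvK 0) ++ (u.filter (pvK 1) ++ (u.filter (pvK 2) ++ u.filter (pvK 3))) := by
  induction u using List.reverseRecOn with
  | nil => rfl
  | append_singleton l x ih =>
    show List.foldl _ [] (l ++ [x]) = _
    rw [List.foldl_append]
    simp only [List.foldl_cons, List.foldl_nil, Bool.false_eq_true, if_false]
    have hl : List.foldl
        (fun acc y => PySem.List.insertBy (fun a b => decide (pvPriority a < pvPriority b)) y acc)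
        [] l = PySem.List.sorted l pvPriority false := rfl
    rw [hl, ih]
    set bf : String → String → Bool := fun a b => decide (pvPriority a < pvPriority b) with hbf
    have hskip : ∀ (i : Int), i ≤ pvPriority x → ∀ a ∈ l.filter (pvK i), bf x a = false := by
      intro i hi a ha
      have hpa := mem_filter_pvK ha
      simp [hbf, hpa]
      omega
    have hfront : ∀ (i : Int), pvPriority x < i → ∀ a ∈ l.filter (pvK i), bf x a = true := by
      intro i hi a ha
      have hpa := mem_filter_pvK ha
      simp [hbf, hpa]
      omega
    have hfx : ∀ (i : Int), List.filter (pvK i) (l ++ [x])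
        = l.filter (pvK i) ++ (if pvK i x then [x] else []) := by
      intro i
      rw [List.filter_append]
      congr 1
      cases h : pvK i x <;> simp [List.filter_cons, h]
    rcases pvPriority_cases x with h | h | h | h <;>
      rw [hfx 0, hfx 1, hfx 2, hfx 3, pvK_val h, pvK_val h, pvK_val h, pvK_val h]
    · rw [insertBy_skip bf x _ _ (hskip 0 (by omega)),
        insertBy_front bf x _ (by
          intro a ha
          simp only [List.mem_append] at ha
          rcases ha with ha | ha | ha
          · exact hfront 1 (by omega) a ha
          · exact hfront 2 (by omega) a ha
          · exact hfront 3 (by omega) a ha)]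
      simp
    · rw [show l.filter (pvK 0) ++ (l.filter (pvK 1) ++ (l.filter (pvK 2) ++ l.filter (pvK 3)))
          = (l.filter (pvK 0) ++ l.filter (pvK 1)) ++ (l.filter (pvK 2) ++ l.filter (pvK 3)) by
            simp [List.append_assoc],
        insertBy_skip bf x _ _ (by
          intro a ha
          simp only [List.mem_append] at ha
          rcases ha with ha | ha
          · exact hskip 0 (by omega) a ha
          · exact hskip 1 (by omega) a ha),
        insertBy_front bf x _ (by
          intro a ha
          simp only [List.mem_append] at ha
          rcases ha with ha | ha
          · exact hfront 2 (by omega) a ha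
          · exact hfront 3 (by omega) a ha)]
      simp
    · rw [show l.filter (pvK 0) ++ (l.filter (pvK 1) ++ (l.filter (pvK 2) ++ l.filter (pvK 3)))
          = (l.filter (pvK 0) ++ (l.filter (pvK 1) ++ l.filter (pvK 2))) ++ l.filter (pvK 3) by
            simp [List.append_assoc],
        insertBy_skip bf x _ _ (by
          intro a ha
          simp only [List.mem_append] at ha
          rcases ha with ha | ha | ha
          · exact hskip 0 (by omega) a ha
          · exact hskip 1 (by omega) a ha
          · exact hskip 2 (by omega) a ha),
        insertBy_front bf x _ (hfront 3 (by omega))]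
      simp
    · rw [show l.filter (pvK 0) ++ (l.filter (pvK 1) ++ (l.filter (pvK 2) ++ l.filter (pvK 3)))
          = (l.filter (pvK 0) ++ (l.filter (pvK 1) ++ l.filter (pvK 2))) ++ l.filter (pvK 3) by
            simp [List.append_assoc],
        insertBy_skip bf x _ _ (by
          intro a ha
          simp only [List.mem_append] at ha
          rcases ha with ha | ha | ha
          · exact hskip 0 (by omega) a ha
          · exact hskip 1 (by omega) a ha
          · exact hskip 2 (by omega) a ha),
        PySem.List.insertBy_of_forall_not_before bf x _ (hskip 3 (by omega))]
      simp

-- A's dedup of the three prefix buckets followed by everything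
lemma a_ordered (xs : List String) :
    List.foldl PySem.Set.add []
        ((([] ++ xs.filter (pvK 0) ++ xs.filter (pvK 1)) ++ xs.filter (pvK 2)) ++ xs)
      = (PySem.List.dedup xs).filter (pvK 0) ++ ((PySem.List.dedup xs).filter (pvK 1)
          ++ ((PySem.List.dedup xs).filter (pvK 2) ++ (PySem.List.dedup xs).filter (pvK 3))) := by
  rw [List.foldl_append, List.foldl_append, List.nil_append, List.foldl_append]
  have h0 : List.foldl PySem.Set.add [] (xs.filter (pvK 0))
      = (PySem.List.dedup xs).filter (pvK 0) := by
    rw [show List.foldl PySem.Set.add [] (xs.filter (pvK 0))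
        = PySem.List.dedup (xs.filter (pvK 0)) from rfl, dedup_filter]
  rw [h0]
  have hdisj : ∀ (i j : Int), i ≠ j → ∀ a ∈ (PySem.List.dedup xs).filter (pvK i),
      a ∉ (PySem.List.dedup xs).filter (pvK j) := by
    intro i j hij a ha hb
    exact hij (mem_filter_pvK ha ▸ mem_filter_pvK hb ▸ rfl)
  have h1 : List.foldl PySem.Set.add ((PySem.List.dedup xs).filter (pvK 0)) (xs.filter (pvK 1))
      = (PySem.List.dedup xs).filter (pvK 0) ++ (PySem.List.dedup xs).filter (pvK 1) := by
    rw [foldl_add_eq, dedup_filter]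
    congr 1
    apply List.filter_eq_self.mpr
    intro a ha
    simp only [Bool.not_eq_eq_eq_not, Bool.not_true]
    simp only [List.contains_eq_mem, decide_eq_false_iff_not]
    exact hdisj 1 0 (by omega) a ha
  rw [h1]
  have h2 : List.foldl PySem.Set.add
        ((PySem.List.dedup xs).filter (pvK 0) ++ (PySem.List.dedup xs).filter (pvK 1))
        (xs.filter (pvK 2))
      = ((PySem.List.dedup xs).filter (pvK 0) ++ (PySem.List.dedup xs).filter (pvK 1))
          ++ (PySem.List.dedup xs).filter (pvK 2) := by
    rw [foldl_add_eq, dedup_filter]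
    congr 1
    apply List.filter_eq_self.mpr
    intro a ha
    simp only [Bool.not_eq_eq_eq_not, Bool.not_true]
    simp only [List.contains_eq_mem, decide_eq_false_iff_not, List.mem_append]
    push_neg
    exact ⟨hdisj 2 0 (by omega) a ha, hdisj 2 1 (by omega) a ha⟩
  rw [h2, foldl_add_eq]
  have h3 : ((PySem.List.dedup xs).filter fun x =>
        !(((PySem.List.dedup xs).filter (pvK 0) ++ (PySem.List.dedup xs).filter (pvK 1))
            ++ (PySem.List.dedup xs).filter (pvK 2)).contains x)
      = (PySem.List.dedup xs).filter (pvK 3) := by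
    apply List.filter_congr
    intro a ha
    simp only [List.contains_eq_mem, List.mem_append, List.mem_filter]
    have ha' : a ∈ xs := (PySem.List.mem_dedup xs a).mp ha
    rcases pvPriority_cases a with hp | hp | hp | hp <;>
      simp [pvK_val hp, ha, ha']
  rw [h3]
  simp [List.append_assoc]

-- ===== VERDICT (by name: the statement is the Claim_ definition above) =====
theorem representative_nested_files_spec : Claim_equal_representative_nested_files := by
  intro xs _
  unfold Spec_representative_nested_files representative_nested_files representative_nested_files_alt
  simp only [List.foldl_cons, List.foldl_nil]
  rw [show ((PySem.Set.empty : PySem.Set String), ([] : List String))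
      = (([] : List String), ([] : List String)) from rfl,
    b_loop_eq xs []]
  have e0 : List.filter (fun path => PySem.Str.startswith path "scripts/") xs
      = xs.filter (pvK 0) := List.filter_congr (fun p _ => start_scripts_eq p)
  have e1 : List.filter (fun path => PySem.Str.startswith path "tests/") xs
      = xs.filter (pvK 1) := List.filter_congr (fun p _ => start_tests_eq p)
  have e2 : List.filter (fun path => PySem.Str.startswith path "references/") xs
      = xs.filter (pvK 2) := List.filter_congr (fun p _ => start_refs_eq p)
  rw [e0, e1, e2,
    show (fun (ordered : List String) path =>
        if ordered.contains path then ordered else ordered ++ [path]) = PySem.Set.add from rfl,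
    a_ordered xs,
    show List.foldl PySem.Set.add [] xs = PySem.List.dedup xs from rfl,
    sorted_prio (PySem.List.dedup xs)]
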